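-- pv_equiv track=rewrite | github.com/shiridikumar/cp | med.py | min_moves_to_median
-- ===== SOURCE A (Python) =====
-- def min_moves_to_median(price, k):
--     n = len(price)
--     price.sort()
--
--     median_index = (n-1) // 2
--     median = price[median_index]
--
--     if median == k:
--         return 0
--
--     moves = 0
--     if median > k:
--         for i in range(median_index, -1, -1):
--             moves += max(0, price[i] - k)
--     else:
--         for i in range(median_index, n):
--             moves += max(0, k - price[i])
--
--     return moves
-- ===== SOURCE B (Python) =====
-- def _select(xs, i):
--     # iterative quickselect (middle-element pivot, three-way partition):
--     # returns the element that sorted(xs)[i] would be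
--     while True:
--         p = xs[len(xs) // 2]
--         lt = [x for x in xs if x < p]
--         gt = [x for x in xs if x > p]
--         if i < len(lt):
--             xs = lt
--         elif i < len(xs) - len(gt):
--             return p
--         else:
--             i -= len(xs) - len(gt)
--             xs = gt
--
--
-- def min_moves_to_median(price, k):
--     n = len(price)
--     m = (n - 1) // 2
--     median = _select(price, m)
--     if median == k:
--         return 0
--     if median > k:
--         lt = [x for x in price if x < median]
--         return sum(max(0, x - k) for x in lt) + (m + 1 - len(lt)) * (median - k)
--     gt = [x for x in price if x > median]
--     return sum(max(0, k - x) for x in gt) + (n - m - len(gt)) * (k - median)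
-- ===== Notes on version B (the rewrite author's own statement) =====
-- stated objective: alternative
-- what changed: B replaces the full sort with an iterative three-way quickselect to find the median and computes each half-sum in one unordered pass over the original list plus a closed-form term for the copies of the median, instead of summing over index ranges of the sorted array.
import Mathlib
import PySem

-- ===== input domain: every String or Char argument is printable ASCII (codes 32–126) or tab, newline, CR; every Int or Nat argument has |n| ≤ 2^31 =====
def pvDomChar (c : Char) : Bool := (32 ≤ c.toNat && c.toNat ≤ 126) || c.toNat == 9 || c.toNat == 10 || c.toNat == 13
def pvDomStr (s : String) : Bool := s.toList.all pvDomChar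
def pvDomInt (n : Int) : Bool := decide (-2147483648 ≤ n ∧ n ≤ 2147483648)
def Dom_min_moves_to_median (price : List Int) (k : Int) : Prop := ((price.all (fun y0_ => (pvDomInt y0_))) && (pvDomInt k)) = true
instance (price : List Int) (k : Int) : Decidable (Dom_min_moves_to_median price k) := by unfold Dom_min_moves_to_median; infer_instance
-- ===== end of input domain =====

-- B finds the median by iterative three-way quickselect and computes each half-sum in one
-- unordered pass over the original list plus a closed-form term for the median copies,
-- instead of sorting and summing over index ranges. NOTE: Python A sorts `price` in place;
-- the equivalence proved here is about the RETURN value only (B does not mutate).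


-- ===== PORT A =====
-- `price[median_index]` and `price[i]` are always in range when price ≠ [] (= Pre_ below),
-- so pyGetD with dummy default 0 is exact there.
def min_moves_to_median (price : List Int) (k : Int) : Int :=
  let n : Int := PySem.List.len price
  let s := PySem.List.sorted price (fun x => x)
  let median_index := PySem.Int.floordiv (n - 1) 2
  let median := PySem.List.pyGetD s median_index 0
  if median = k then 0
  else if median > k then
    (PySem.List.pyRange median_index (-1) (-1)).foldl
      (fun moves i => moves + max 0 (PySem.List.pyGetD s i 0 - k)) 0
  else
    (PySem.List.pyRange median_index n).foldl
      (fun moves i => moves + max 0 (k - PySem.List.pyGetD s i 0)) 0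

-- ===== PORT B =====
-- termination helpers for the quickselect loop (cited in decreasing_by)
theorem pv_length_filter_lt {α : Type} (pr : α → Bool) {xs : List α} {p : α}
    (hp : p ∈ xs) (h : pr p = false) : (xs.filter pr).length < xs.length :=
  List.length_filter_lt_length_iff_exists.mpr ⟨p, hp, by simp [h]⟩

theorem pv_getD_half_mem {xs : List Int} (hne : xs ≠ []) : xs.getD (xs.length / 2) 0 ∈ xs := by
  have h : xs.length / 2 < xs.length :=
    Nat.div_lt_self (List.length_pos_of_ne_nil hne) (by norm_num)
  rw [List.getD_eq_getElem _ _ h]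
  exact List.getElem_mem h

-- iterative quickselect from Source B: the `while True` loop becomes recursion on the
-- shrinking partition; the `[] => 0` arm is unreachable in B's use (Python raises there).
def selectB : List Int → Int → Int
  | [], _ => 0
  | a :: rest, i =>
    let p := (a :: rest).getD ((a :: rest).length / 2) 0
    let lt := (a :: rest).filter (fun x => decide (x < p))
    let gt := (a :: rest).filter (fun x => decide (p < x))
    if i < (lt.length : Int) then selectB lt i
    else if i < ((a :: rest).length : Int) - (gt.length : Int) then p
    else selectB gt (i - (((a :: rest).length : Int) - (gt.length : Int)))
termination_by xs _ => xs.length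
decreasing_by
  · exact pv_length_filter_lt _ (pv_getD_half_mem (by simp)) (by simp)
  · exact pv_length_filter_lt _ (pv_getD_half_mem (by simp)) (by simp)

def min_moves_to_median_alt (price : List Int) (k : Int) : Int :=
  let n : Int := PySem.List.len price
  let m := PySem.Int.floordiv (n - 1) 2
  let median := selectB price m
  if median = k then 0
  else if median > k then
    let lt := price.filter (fun x => decide (x < median))
    (lt.map (fun x => max 0 (x - k))).sum + (m + 1 - (lt.length : Int)) * (median - k)
  else
    let gt := price.filter (fun x => decide (median < x))
    (gt.map (fun x => max 0 (k - x))).sum + (n - m - (gt.length : Int)) * (k - median)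

-- ===== PRECONDITION & SPEC =====
-- Pre_ excludes exactly the empty list, on which Python A raises IndexError (price[-1]).
def Pre_min_moves_to_median (price : List Int) (k : Int) : Prop := price ≠ []
instance (price : List Int) (k : Int) : Decidable (Pre_min_moves_to_median price k) := by unfold Pre_min_moves_to_median; infer_instance
def pvWitness_min_moves_to_median : List Int × Int := ([1, 3, 2], 2)

def Spec_min_moves_to_median (price : List Int) (k : Int) (out : Int) : Prop := out = min_moves_to_median_alt price k
instance (price : List Int) (k : Int) (out : Int) : Decidable (Spec_min_moves_to_median price k out) := by unfold Spec_min_moves_to_median; infer_instance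

-- ===== CLAIM (what is proved, stated in full; the proofs are below) =====
def Claim_equal_min_moves_to_median : Prop := ∀ (price : List Int) (k : Int), Dom_min_moves_to_median price k → Pre_min_moves_to_median price k → Spec_min_moves_to_median price k (min_moves_to_median price k)

-- ===== LEMMAS AND PROOFS =====

-- the sorted list splits at any pivot p into (sorted <p) ++ (=p) ++ (sorted >p)
theorem pv_sorted_decomp (xs : List Int) (p : Int) :
    PySem.List.sorted xs (fun x => x) =
      PySem.List.sorted (xs.filter (fun x => decide (x < p))) (fun x => x)
        ++ (xs.filter (fun x => decide (x = p))
        ++ PySem.List.sorted (xs.filter (fun x => decide (p < x))) (fun x => x)) := by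
  apply PySem.List.sorted_id_eq_of_perm_of_pairwise
  · have h1 := List.filter_append_perm (fun x => decide (x < p)) xs
    have h2 := List.filter_append_perm (fun x => decide (x = p)) (xs.filter (fun x => !decide (x < p)))
    have he : (xs.filter (fun x => !decide (x < p))).filter (fun x => decide (x = p))
        = xs.filter (fun x => decide (x = p)) := by
      rw [List.filter_filter]
      apply List.filter_congr
      intro x _
      by_cases hx : x = p <;> simp [hx]
    have hg : (xs.filter (fun x => !decide (x < p))).filter (fun x => !decide (x = p))
        = xs.filter (fun x => decide (p < x)) := by
      rw [List.filter_filter]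
      apply List.filter_congr
      intro x _
      by_cases h1 : x < p <;> by_cases h2 : x = p <;> simp [h1, h2] <;> omega
    have pa : (PySem.List.sorted (xs.filter (fun x => decide (x < p))) (fun x => x)
        ++ (xs.filter (fun x => decide (x = p))
        ++ PySem.List.sorted (xs.filter (fun x => decide (p < x))) (fun x => x))).Perm
        (xs.filter (fun x => decide (x < p))
        ++ (xs.filter (fun x => decide (x = p)) ++ xs.filter (fun x => decide (p < x)))) :=
      List.Perm.append (PySem.List.sorted_perm _ _ _)
        (List.Perm.append (List.Perm.refl _) (PySem.List.sorted_perm _ _ _))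
    have pb : (xs.filter (fun x => decide (x < p))
        ++ (xs.filter (fun x => decide (x = p)) ++ xs.filter (fun x => decide (p < x)))).Perm xs := by
      rw [← he, ← hg]
      exact (List.Perm.append (List.Perm.refl _) h2).trans h1
    exact pa.trans pb
  · rw [List.pairwise_append]
    refine ⟨PySem.List.sorted_pairwise _ _, ?_, ?_⟩
    · rw [List.pairwise_append]
      refine ⟨?_, PySem.List.sorted_pairwise _ _, ?_⟩
      · have hE : ∀ x ∈ xs.filter (fun x => decide (x = p)), x = p := by
          intro x hx
          simpa using (List.mem_filter.mp hx).2
        rw [List.eq_replicate_of_mem hE]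
        exact List.pairwise_replicate.mpr (Or.inr le_rfl)
      · intro a ha b hb
        have ha' : a = p := by simpa using (List.mem_filter.mp ha).2
        have hb' : p < b := by
          have := (List.mem_filter.mp ((PySem.List.mem_sorted _ _ _ _).mp hb)).2
          simpa using this
        omega
    · intro a ha b hb
      have ha' : a < p := by
        have := (List.mem_filter.mp ((PySem.List.mem_sorted _ _ _ _).mp ha)).2
        simpa using this
      rcases List.mem_append.mp hb with hb | hb
      · have : b = p := by simpa using (List.mem_filter.mp hb).2
        omega
      · have : p < b := by
          have := (List.mem_filter.mp ((PySem.List.mem_sorted _ _ _ _).mp hb)).2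
          simpa using this
        omega

-- quickselect computes sorted(xs)[i]
theorem pv_selectB_eq (N : Nat) : ∀ (xs : List Int), xs.length ≤ N → ∀ i : Int, 0 ≤ i →
    i < (xs.length : Int) →
    selectB xs i = (PySem.List.sorted xs (fun x => x)).getD i.toNat 0 := by
  induction N with
  | zero =>
    intro xs hN i h0 hi
    have hz : xs.length = 0 := Nat.le_zero.mp hN
    rw [hz] at hi
    simp at hi
    omega
  | succ N IH =>
    intro xs hN i h0 hi
    match xs with
    | [] => simp at hi; omega
    | a :: rest =>
      set xs := a :: rest with hxs
      set p := xs.getD (xs.length / 2) 0 with hp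
      set lt := xs.filter (fun x => decide (x < p)) with hlt
      set eqs := xs.filter (fun x => decide (x = p)) with heqs
      set gt := xs.filter (fun x => decide (p < x)) with hgt
      have hpmem : p ∈ xs := pv_getD_half_mem (by simp [hxs])
      have hltlen : lt.length < xs.length := pv_length_filter_lt _ hpmem (by simp)
      have hgtlen : gt.length < xs.length := pv_length_filter_lt _ hpmem (by simp)
      have hdec := pv_sorted_decomp xs p
      have hsum : lt.length + (eqs.length + gt.length) = xs.length := by
        have := congrArg List.length hdec
        simpa [PySem.List.length_sorted] using this.symm
      have hL : (PySem.List.sorted lt (fun x => x)).length = lt.length :=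
        PySem.List.length_sorted _ _ _
      have hG : (PySem.List.sorted gt (fun x => x)).length = gt.length :=
        PySem.List.length_sorted _ _ _
      rw [selectB.eq_2, hdec]
      rw [← hxs, ← hp, ← hlt, ← hgt]
      split_ifs with h1 h2
      · have hi' : i.toNat < lt.length := by omega
        rw [IH lt (by omega) i h0 (by omega)]
        rw [List.getD_append _ _ _ _ (by omega)]
      · have hge : lt.length ≤ i.toNat := by omega
        have hmid : i.toNat - lt.length < eqs.length := by omega
        have hbound : i.toNat < (PySem.List.sorted lt (fun x => x)
            ++ (eqs ++ PySem.List.sorted gt (fun x => x))).length := by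
          simp [hL, hG]; omega
        rw [List.getD_eq_getElem _ _ hbound]
        rw [List.getElem_append_right (by omega)]
        rw [List.getElem_append_left (by simp [hL]; omega)]
        simp only [hL]
        have hmem : eqs[i.toNat - lt.length]'(by omega) ∈ eqs :=
          List.getElem_mem _
        have heq : eqs[i.toNat - lt.length]'(by omega) = p := by
          have := (List.mem_filter.mp hmem).2
          simpa using this
        exact heq.symm
      · have h3 : i - ((xs.length : Int) - (gt.length : Int)) < (gt.length : Int) := by
          omega
        have h4 : 0 ≤ i - ((xs.length : Int) - (gt.length : Int)) := by omega
        rw [IH gt (by omega) _ h4 h3]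
        have hiN : (i - ((xs.length : Int) - (gt.length : Int))).toNat
            = i.toNat - lt.length - eqs.length := by omega
        rw [hiN]
        have hbound : i.toNat < (PySem.List.sorted lt (fun x => x)
            ++ (eqs ++ PySem.List.sorted gt (fun x => x))).length := by
          simp [hL, hG]; omega
        rw [List.getD_eq_getElem _ _ hbound,
            List.getElem_append_right (by omega),
            List.getElem_append_right (by simp [hL]; omega)]
        rw [List.getD_eq_getElem _ _ (by simp [hG]; omega)]
        congr 1
        simp [hL]

-- (range c).map (fun j => s.getD j 0) covers exactly the first c elements
theorem pv_map_range_getD (s : List Int) : ∀ c : Nat, c ≤ s.length →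
    (List.range c).map (fun j => s.getD j 0) = s.take c := by
  intro c
  induction c with
  | zero => simp
  | succ c ih =>
    intro h
    rw [List.range_succ, List.map_append, ih (by omega), List.take_add_one]
    simp [List.getElem?_eq_getElem (show c < s.length by omega)]

-- ===== VERDICT (by name: the statement is the Claim_ definition above) =====
theorem min_moves_to_median_spec : Claim_equal_min_moves_to_median := by
  intro price k _hdom hpre
  unfold Spec_min_moves_to_median
  have hn : 0 < price.length := List.length_pos_of_ne_nil hpre
  simp only [min_moves_to_median, min_moves_to_median_alt]
  have hslen : (PySem.List.sorted price (fun x => x)).length = price.length :=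
    PySem.List.length_sorted _ _ _
  set s := PySem.List.sorted price (fun x => x) with hs
  set m : Nat := (price.length - 1) / 2 with hm
  have hmn : m < price.length := by omega
  have hmi : PySem.Int.floordiv ((PySem.List.len price) - 1) 2 = ((m : Nat) : Int) := by
    have h1 : (PySem.List.len price) - 1 = ((price.length - 1 : Nat) : Int) := by
      simp [PySem.List.len]; omega
    rw [h1]
    exact_mod_cast PySem.Int.floordiv_natCast (price.length - 1) 2
  rw [hmi]
  have hA : PySem.List.pyGetD s ((m : Nat) : Int) 0 = s.getD m 0 :=
    PySem.List.pyGetD_natCast s m 0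
  have hB : selectB price ((m : Nat) : Int) = s.getD m 0 := by
    rw [pv_selectB_eq price.length price le_rfl _ (by positivity) (by exact_mod_cast hmn)]
    simp only [Int.toNat_natCast]
    rw [← hs]
  rw [hA, hB]
  set p := s.getD m 0 with hpdef
  set lt := price.filter (fun x => decide (x < p)) with hlt
  set eqs := price.filter (fun x => decide (x = p)) with heqs
  set gt := price.filter (fun x => decide (p < x)) with hgt
  have hdec : s = PySem.List.sorted lt (fun x => x)
      ++ (eqs ++ PySem.List.sorted gt (fun x => x)) := pv_sorted_decomp price p
  have hL : (PySem.List.sorted lt (fun x => x)).length = lt.length :=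
    PySem.List.length_sorted _ _ _
  have hG : (PySem.List.sorted gt (fun x => x)).length = gt.length :=
    PySem.List.length_sorted _ _ _
  have hsum : lt.length + (eqs.length + gt.length) = price.length := by
    have := congrArg List.length hdec
    simpa [PySem.List.length_sorted, hslen] using this.symm
  have hsm : s[m]'(by omega) = p := by
    rw [hpdef, List.getD_eq_getElem _ _ (by omega)]
  -- position bounds of the median in the decomposition
  have hlow : lt.length ≤ m := by
    by_contra hcon
    push_neg at hcon
    have : s[m]'(by omega) ∈ PySem.List.sorted lt (fun x => x) := by
      simp only [hdec]
      rw [List.getElem_append_left (by omega)]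
      exact List.getElem_mem _
    have : p < p := by
      have := (List.mem_filter.mp ((PySem.List.mem_sorted _ _ _ _).mp (hsm ▸ this))).2
      simpa using this
    omega
  have hhigh : m < lt.length + eqs.length := by
    by_contra hcon
    push_neg at hcon
    have hmem : s[m]'(by omega) ∈ PySem.List.sorted gt (fun x => x) := by
      simp only [hdec]
      rw [List.getElem_append_right (by omega), List.getElem_append_right (by simp [hL]; omega)]
      exact List.getElem_mem _
    have : p < p := by
      have := (List.mem_filter.mp ((PySem.List.mem_sorted _ _ _ _).mp (hsm ▸ hmem))).2
      simpa using this
    omega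
  have herep : eqs = List.replicate eqs.length p := by
    apply List.eq_replicate_of_mem
    intro x hx
    simpa using (List.mem_filter.mp hx).2
  split_ifs with hk hgtk
  · rfl
  · -- median > k: left half
    rw [PySem.List.pyRange_neg_one_eq_reverse, PySem.List.foldl_add, List.map_reverse,
      List.sum_reverse]
    have h01 : (-1 : Int) + 1 = 0 := by norm_num
    rw [h01, PySem.List.pyRange_one]
    have hlen1 : (((m : Nat) : Int) + 1 - 0).toNat = m + 1 := by omega
    rw [hlen1, List.map_map]
    have hfun : ((fun i => max 0 (PySem.List.pyGetD s i 0 - k)) ∘ fun j : Nat => (0 : Int) + (j : Int))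
        = (fun j : Nat => max 0 (s.getD j 0 - k)) := by
      funext j
      simp [PySem.List.pyGetD_natCast]
    rw [hfun]
    have hsplit : (fun j : Nat => max 0 (s.getD j 0 - k))
        = (fun x : Int => max 0 (x - k)) ∘ (fun j : Nat => s.getD j 0) := rfl
    rw [hsplit, ← List.map_map, pv_map_range_getD s (m + 1) (by omega)]
    have htake : s.take (m + 1)
        = PySem.List.sorted lt (fun x => x) ++ List.replicate (m + 1 - lt.length) p := by
      rw [hdec, List.take_append,
        List.take_of_length_le (by omega),
        List.take_append]
      have h0 : m + 1 - (PySem.List.sorted lt (fun x => x)).length - eqs.length = 0 := by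
        simp [hL]; omega
      rw [h0, List.take_zero, List.append_nil]
      congr 1
      rw [herep, List.take_replicate]
      congr 1
      simp [hL]
      omega
    rw [htake, List.map_append, List.sum_append, List.map_replicate, List.sum_replicate]
    have hperm : ((PySem.List.sorted lt (fun x => x)).map (fun x => max 0 (x - k))).sum
        = (lt.map (fun x => max 0 (x - k))).sum :=
      List.Perm.sum_eq (List.Perm.map _ (PySem.List.sorted_perm _ _ _))
    rw [hperm]
    have hmax : max 0 (p - k) = p - k := by omega
    rw [hmax, nsmul_eq_mul]
    have hc : ((m + 1 - lt.length : Nat) : Int) = ((m : Nat) : Int) + 1 - (lt.length : Int) := by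
      omega
    rw [hc]
    ring
  · -- median < k: right half
    have hpk : p < k := by omega
    have hlenps : PySem.List.len price = PySem.List.len s := by
      simp [PySem.List.len, hslen]
    rw [hlenps, PySem.List.foldl_pyRange_pyGetD s 0 (fun acc x => acc + max 0 (k - x)) 0
      (by positivity), PySem.List.foldl_add]
    have htn : ((m : Nat) : Int).toNat = m := by omega
    rw [htn]
    have hdrop : s.drop m
        = List.replicate (lt.length + eqs.length - m) p ++ PySem.List.sorted gt (fun x => x) := by
      rw [hdec, List.drop_append,
        List.drop_eq_nil_of_le (by omega), List.nil_append,
        List.drop_append]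
      have h0 : m - (PySem.List.sorted lt (fun x => x)).length - eqs.length = 0 := by
        simp [hL]; omega
      rw [h0, List.drop_zero]
      congr 1
      rw [herep, List.drop_replicate]
      congr 1
      simp [hL]
      omega
    rw [hdrop, List.map_append, List.sum_append, List.map_replicate, List.sum_replicate]
    have hperm : ((PySem.List.sorted gt (fun x => x)).map (fun x => max 0 (k - x))).sum
        = (gt.map (fun x => max 0 (k - x))).sum :=
      List.Perm.sum_eq (List.Perm.map _ (PySem.List.sorted_perm _ _ _))
    rw [hperm]
    have hmax : max 0 (k - p) = k - p := by omega
    rw [hmax, nsmul_eq_mul]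
    have hc : ((lt.length + eqs.length - m : Nat) : Int)
        = PySem.List.len s - ((m : Nat) : Int) - (gt.length : Int) := by
      simp [PySem.List.len, hslen]
      omega
    rw [hc]
    ring
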